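-- pv_equiv track=rewrite | github.com/chiragjn/advent-of-code-solutions | 2018/solutions/day2_part2.py | solve
-- ===== SOURCE A (Python) =====
-- from typing import Iterable, List
--
-- def diff(str1: str, str2: str) -> List[int]:
--     if len(str1) == len(str2):
--         return [i for i in range(len(str1)) if str1[i] != str2[i]]
--     return []
--
-- def solve(input_iter: Iterable[str]) -> str:
--     inp = [line.strip() for line in input_iter]
--     for i in range(len(inp)):
--         for j in range(i):
--             positions = diff(inp[i], inp[j])
--             if len(positions) == 1:
--                 return ''.join([c for k, c in enumerate(inp[i]) if k != positions[0]])
--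
--     return 'ERROR'
-- ===== SOURCE B (Python) =====
-- from typing import Iterable
--
-- def solve(input_iter):
--     inp = [line.strip() for line in input_iter]
--     buckets = {}
--     for i, s in enumerate(inp):
--         cands = []
--         for k in range(len(s)):
--             masked = s[:k] + s[k + 1:]
--             for j, t in buckets.get((k, masked), []):
--                 if t != s:
--                     cands.append((j, masked))
--                     break
--         best = None
--         for c in cands:
--             if best is None or c[0] < best[0]:
--                 best = c
--         if best is not None:
--             return best[1]
--         for k in range(len(s)):
--             masked = s[:k] + s[k + 1:]
--             buckets.setdefault((k, masked), []).append((i, s))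
--     return 'ERROR'
-- ===== Notes on version B (the rewrite author's own statement) =====
-- stated objective: faster
-- what changed: Replaces the O(n^2) all-pairs character-diff scan with a single pass that hash-indexes every string under each of its one-char-removed masks (keyed by removed position), so the partner differing in exactly one position is found by dictionary lookup; earliest-index tracking preserves A's i-then-j tie-breaking exactly.
import Mathlib
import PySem

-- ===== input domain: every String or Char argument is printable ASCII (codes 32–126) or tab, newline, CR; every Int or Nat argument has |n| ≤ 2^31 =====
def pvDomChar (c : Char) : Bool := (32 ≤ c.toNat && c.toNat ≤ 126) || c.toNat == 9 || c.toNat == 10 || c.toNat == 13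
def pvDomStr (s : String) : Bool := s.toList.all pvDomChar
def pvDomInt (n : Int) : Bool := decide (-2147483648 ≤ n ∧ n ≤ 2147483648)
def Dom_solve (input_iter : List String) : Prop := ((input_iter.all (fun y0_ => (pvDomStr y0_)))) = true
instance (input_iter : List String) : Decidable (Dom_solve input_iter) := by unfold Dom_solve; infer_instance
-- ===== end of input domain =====

-- B replaces A's O(n^2) all-pairs diff scan by indexing each line under its one-char-removed
-- masks in a dictionary (single pass, earliest-index tracking); objective: faster.

-- ===== PORT A =====
-- helper diff(str1, str2): strings handled as List Char (PySem convention)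
def diffPos (s t : List Char) : List Nat :=
  if s.length = t.length then
    (List.range s.length).filter (fun i => decide (s[i]? ≠ t[i]?))
  else []

-- Python's enumerate yields (k, c); List.zipIdx yields (c, k), so the index is ck.2.
def solve (input_iter : List String) : String :=
  let inp := input_iter.map (fun line => (PySem.Str.strip line).toList)
  match (List.range inp.length).findSome? (fun i =>
      (List.range i).findSome? (fun j =>
        let positions := diffPos (inp.getD i []) (inp.getD j []);
        if positions.length = 1 then
          some ((((inp.getD i []).zipIdx).filter
                  (fun ck => decide (ck.2 ≠ positions.headD 0))).map (fun ck => ck.1))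
        else none)) with
  | some r => String.ofList r
  | none => "ERROR"

-- ===== PORT B =====
-- s[:k] + s[k+1:] for a Nat index k (exact: both slice bounds are nonnegative)
def maskAt (s : List Char) (k : Nat) : List Char := s.take k ++ s.drop (k + 1)

abbrev Buckets := PySem.Dict (Nat × List Char) (List (Nat × List Char))

-- the `cands` list: for each k, the first earlier line in bucket (k, masked) that differs from s
def candsB (s : List Char) (d : Buckets) : List (Nat × List Char) :=
  (List.range s.length).filterMap (fun k =>
    match (d.getD (k, maskAt s k) []).find? (fun jt => decide (jt.2 ≠ s)) with
    | some jt => some (jt.1, maskAt s k)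
    | none => none)

-- the `best` loop: minimum candidate by stored index j
def bestOf (cands : List (Nat × List Char)) : Option (Nat × List Char) :=
  cands.foldl (fun best c =>
    match best with
    | none => some c
    | some b => if c.1 < b.1 then some c else some b) none

-- buckets.setdefault((k, masked), []).append((i, s)) for each k
def insertMasks (s : List Char) (i : Nat) (d : Buckets) : Buckets :=
  (List.range s.length).foldl (fun d k =>
    d.insert (k, maskAt s k) (d.getD (k, maskAt s k) [] ++ [(i, s)])) d

def goB (d : Buckets) (i : Nat) : List (List Char) → Option (List Char)
  | [] => none
  | s :: rest =>
    match bestOf (candsB s d) with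
    | some b => some b.2
    | none => goB (insertMasks s i d) (i + 1) rest

def solve_alt (input_iter : List String) : String :=
  let inp := input_iter.map (fun line => (PySem.Str.strip line).toList)
  match goB PySem.Dict.empty 0 inp with
  | some r => String.ofList r
  | none => "ERROR"

-- ===== PRECONDITION & SPEC =====
def Spec_solve (input_iter : List String) (out : String) : Prop := out = solve_alt input_iter
instance (input_iter : List String) (out : String) : Decidable (Spec_solve input_iter out) := by unfold Spec_solve; infer_instance

-- ===== CLAIM (what is proved, stated in full; the proofs are below) =====
def Claim_equal_solve : Prop := ∀ (input_iter : List String), Dom_solve input_iter → Spec_solve input_iter (solve input_iter)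

-- ===== LEMMAS AND PROOFS =====

-- A's inner-loop body as a function: the candidate value produced by comparing s with earlier line t
def fA (s t : List Char) : Option (List Char) :=
  if (diffPos s t).length = 1 then
    some ((s.zipIdx.filter (fun ck => decide (ck.2 ≠ (diffPos s t).headD 0))).map (fun ck => ck.1))
  else none

-- A's double loop, reformulated over the processed prefix
def scanA (prev : List (List Char)) : List (List Char) → Option (List Char)
  | [] => none
  | s :: rest =>
    match prev.findSome? (fA s) with
    | some r => some r
    | none => scanA (prev ++ [s]) rest

-- specification of a bucket's contents
def bucketSpec (prev : List (List Char)) (k : Nat) (m : List Char) : List (Nat × List Char) :=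
  prev.zipIdx.filterMap (fun tj =>
    if k < tj.1.length ∧ maskAt tj.1 k = m then some (tj.2, tj.1) else none)

def BInv (prev : List (List Char)) (d : Buckets) : Prop :=
  ∀ k m, d.getD (k, m) [] = bucketSpec prev k m

-- all (index, value) matches of s against the prefix, in index order
def matchesJ (s : List Char) (prev : List (List Char)) : List (Nat × List Char) :=
  prev.zipIdx.filterMap (fun tj => (fA s tj.1).map (fun r => (tj.2, r)))

-- removing index k via enumerate-filter equals take k ++ drop (k+1)
lemma filter_zipIdx_all (s : List Char) : ∀ (m j : Nat), j < m →
    ((s.zipIdx m).filter (fun ck => decide (ck.2 ≠ j))).map (fun ck => ck.1) = s := by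
  induction s with
  | nil => intro m j h; simp
  | cons a s ih =>
    intro m j h
    have hne : m ≠ j := by omega
    simp only [List.zipIdx_cons, List.filter_cons]
    rw [if_pos (by simpa using hne)]
    simp only [List.map_cons]
    rw [ih (m + 1) j (by omega)]

lemma filter_zipIdx_ne (s : List Char) : ∀ (n k : Nat),
    ((s.zipIdx n).filter (fun ck => decide (ck.2 ≠ n + k))).map (fun ck => ck.1) =
      s.take k ++ s.drop (k + 1) := by
  induction s with
  | nil => intro n k; simp
  | cons a s ih =>
    intro n k
    cases k with
    | zero =>
      simp only [List.zipIdx_cons, List.filter_cons, Nat.add_zero]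
      rw [if_neg (by simp)]
      rw [filter_zipIdx_all s (n + 1) n (by omega)]
      simp
    | succ k =>
      simp only [List.zipIdx_cons, List.filter_cons]
      rw [if_pos (by simp)]
      simp only [List.map_cons, List.take_succ_cons, List.drop_succ_cons]
      rw [show n + (k + 1) = (n + 1) + k by omega, ih (n + 1) k, List.cons_append]

lemma length_maskAt {s : List Char} {k : Nat} (hk : k < s.length) :
    (maskAt s k).length = s.length - 1 := by
  simp [maskAt]; omega

lemma maskAt_eq_iff {s t : List Char} {k : Nat} (hlen : t.length = s.length) (hk : k < s.length) :
    maskAt t k = maskAt s k ↔ ∀ i, i < s.length → i ≠ k → t[i]? = s[i]? := by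
  constructor
  · intro h i hi hik
    unfold maskAt at h
    have hparts := List.append_inj h (by simp [List.length_take]; omega)
    obtain ⟨h1, h2⟩ := hparts
    rcases lt_trichotomy i k with hlt | heq | hgt
    · have := congrArg (fun l => l[i]?) h1
      simpa [List.getElem?_take, hlt] using this
    · exact absurd heq hik
    · have := congrArg (fun l => l[i - (k + 1)]?) h2
      simp only [List.getElem?_drop] at this
      rwa [show k + 1 + (i - (k + 1)) = i by omega] at this
  · intro h
    unfold maskAt
    have h1 : t.take k = s.take k := by
      apply List.ext_getElem?
      intro i
      simp only [List.getElem?_take]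
      split_ifs with hik
      · exact h i (by omega) (by omega)
      · rfl
    have h2 : t.drop (k + 1) = s.drop (k + 1) := by
      apply List.ext_getElem?
      intro i
      simp only [List.getElem?_drop]
      by_cases hi : k + 1 + i < s.length
      · exact h _ (by omega) (by omega)
      · rw [List.getElem?_eq_none (by omega), List.getElem?_eq_none (by omega)]
    rw [h1, h2]

lemma filter_range_eq_singleton {p : Nat → Bool} {k : Nat} (hpk : p k = true) :
    ∀ {n : Nat}, k < n → (∀ i, i < n → i ≠ k → p i = false) →
      (List.range n).filter p = [k] := by
  intro n
  induction n with
  | zero => omega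
  | succ n ih =>
    intro hk h
    rw [List.range_succ, List.filter_append]
    by_cases hkn : k = n
    · subst hkn
      have h1 : (List.range k).filter p = [] := by
        rw [List.filter_eq_nil_iff]
        intro a ha
        rw [List.mem_range] at ha
        simp [h a (by omega) (by omega)]
      simp [h1, hpk]
    · have hpn : p n = false := h n (by omega) (fun he => hkn he.symm)
      rw [ih (by omega) (fun i hi hik => h i (by omega) hik)]
      simp [hpn]

lemma diffPos_eq_singleton_iff {s t : List Char} {k : Nat} :
    diffPos s t = [k] ↔ t.length = s.length ∧ k < s.length ∧ maskAt t k = maskAt s k ∧ t ≠ s := by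
  constructor
  · intro h
    unfold diffPos at h
    split_ifs at h with hlen
    · have hk : k ∈ (List.range s.length).filter (fun i => decide (s[i]? ≠ t[i]?)) := by
        rw [h]; exact List.mem_singleton.mpr rfl
      rw [List.mem_filter, List.mem_range] at hk
      obtain ⟨hkn, hpk⟩ := hk
      have hag : ∀ i, i < s.length → i ≠ k → t[i]? = s[i]? := by
        intro i hi hik
        by_contra hne
        have hmem : i ∈ (List.range s.length).filter (fun i => decide (s[i]? ≠ t[i]?)) := by
          rw [List.mem_filter, List.mem_range]
          exact ⟨hi, by simp; exact fun he => hne he.symm⟩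
        rw [h, List.mem_singleton] at hmem
        exact hik hmem
      refine ⟨hlen.symm, hkn, (maskAt_eq_iff hlen.symm hkn).mpr hag, ?_⟩
      intro he
      rw [he] at hpk
      simp at hpk
  · rintro ⟨hlen, hk, hmask, hne⟩
    unfold diffPos
    rw [if_pos hlen.symm]
    have hex : ¬ (∀ i, t[i]? = s[i]?) := fun hall => hne (List.ext_getElem? hall)
    rw [not_forall] at hex
    obtain ⟨i, hi⟩ := hex
    have hilt : i < s.length := by
      by_contra hge
      exact hi (by rw [List.getElem?_eq_none (by omega), List.getElem?_eq_none (by omega)])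
    have hik : i = k := by
      by_contra hik
      exact hi ((maskAt_eq_iff hlen hk).mp hmask i hilt hik)
    subst hik
    apply filter_range_eq_singleton
    · simp
      exact fun he => hi he.symm
    · exact hilt
    · intro i2 hi2 hik2
      simp
      exact ((maskAt_eq_iff hlen hilt).mp hmask i2 hi2 hik2).symm

lemma fA_eq_some_iff {s t r : List Char} :
    fA s t = some r ↔ ∃ k, diffPos s t = [k] ∧ r = maskAt s k := by
  unfold fA
  constructor
  · intro h
    split_ifs at h with hlen
    · obtain ⟨a, ha⟩ := List.length_eq_one_iff.mp hlen
      refine ⟨a, ha, ?_⟩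
      rw [ha] at h
      simp only [List.headD_cons, Option.some.injEq] at h
      rw [← h, maskAt]
      have := filter_zipIdx_ne s 0 a
      simpa using this
  · rintro ⟨k, hk, rfl⟩
    rw [hk]
    simp only [List.length_cons, List.length_nil, List.headD_cons]
    have := filter_zipIdx_ne s 0 k
    simpa [maskAt] using this

lemma mem_matchesJ {s : List Char} {prev : List (List Char)} {j : Nat} {r : List Char} :
    (j, r) ∈ matchesJ s prev ↔ ∃ t, prev[j]? = some t ∧ fA s t = some r := by
  unfold matchesJ
  rw [List.mem_filterMap]
  constructor
  · rintro ⟨tj, htj, hmap⟩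
    rw [Option.map_eq_some_iff] at hmap
    obtain ⟨r2, hr2, heq⟩ := hmap
    have hj : tj.2 = j := congrArg Prod.fst heq
    have hr : r2 = r := congrArg Prod.snd heq
    refine ⟨tj.1, ?_, by rw [hr] at hr2; exact hr2⟩
    rw [← hj]
    exact List.mem_zipIdx_iff_getElem?.mp htj
  · rintro ⟨t, ht, hfa⟩
    refine ⟨(t, j), List.mem_zipIdx_iff_getElem?.mpr ht, ?_⟩
    simp [hfa]

lemma mem_bucketSpec {prev : List (List Char)} {k : Nat} {m : List Char} {j : Nat} {t : List Char} :
    (j, t) ∈ bucketSpec prev k m ↔ prev[j]? = some t ∧ k < t.length ∧ maskAt t k = m := by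
  unfold bucketSpec
  rw [List.mem_filterMap]
  constructor
  · rintro ⟨tj, htj, hif⟩
    split_ifs at hif with hc
    · have hj : tj.2 = j := congrArg Prod.fst (Option.some.inj hif)
      have ht : tj.1 = t := congrArg Prod.snd (Option.some.inj hif)
      rw [← hj, ← ht]
      exact ⟨List.mem_zipIdx_iff_getElem?.mp htj, hc.1, hc.2⟩
  · rintro ⟨ht, hk, hm⟩
    refine ⟨(t, j), List.mem_zipIdx_iff_getElem?.mpr ht, ?_⟩
    rw [if_pos ⟨hk, hm⟩]

lemma pairwise_zipIdx {α : Type} (l : List α) : ∀ n : Nat,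
    (l.zipIdx n).Pairwise (fun a b => a.2 < b.2) := by
  induction l with
  | nil => intro n; simp
  | cons a l ih =>
    intro n
    rw [List.zipIdx_cons]
    refine List.Pairwise.cons ?_ (ih (n + 1))
    intro y hy
    have := List.le_snd_of_mem_zipIdx hy
    simp only
    omega

lemma pairwise_bucketSpec (prev : List (List Char)) (k : Nat) (m : List Char) :
    (bucketSpec prev k m).Pairwise (fun a b => a.1 < b.1) := by
  unfold bucketSpec
  refine List.Pairwise.filterMap _ ?_ (pairwise_zipIdx prev 0)
  intro a a2 hR b hb b2 hb2
  split_ifs at hb with hc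
  split_ifs at hb2 with hc2
  rw [← Option.some.inj hb, ← Option.some.inj hb2]
  exact hR

lemma pairwise_matchesJ (s : List Char) (prev : List (List Char)) :
    (matchesJ s prev).Pairwise (fun a b => a.1 < b.1) := by
  unfold matchesJ
  refine List.Pairwise.filterMap _ ?_ (pairwise_zipIdx prev 0)
  intro a a2 hR b hb b2 hb2
  rw [Option.map_eq_some_iff] at hb hb2
  obtain ⟨r, _, hbr⟩ := hb
  obtain ⟨r2, _, hbr2⟩ := hb2
  rw [← hbr, ← hbr2]
  exact hR

lemma find?_min_key {p : Nat × List Char → Bool} :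
    ∀ {l : List (Nat × List Char)}, l.Pairwise (fun a b => a.1 < b.1) →
    ∀ {x : Nat × List Char}, l.find? p = some x →
    ∀ {y : Nat × List Char}, y ∈ l → p y = true → x.1 ≤ y.1 := by
  intro l
  induction l with
  | nil => intro _ x hx; simp at hx
  | cons a l ih =>
    intro hp x hx y hy hpy
    rw [List.pairwise_cons] at hp
    obtain ⟨ha, hp2⟩ := hp
    by_cases hpa : p a
    · rw [List.find?_cons_of_pos hpa] at hx
      have hxa : x = a := (Option.some.inj hx).symm
      subst hxa
      rcases List.mem_cons.mp hy with h | h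
      · rw [h]
      · exact le_of_lt (ha y h)
    · rw [List.find?_cons_of_neg (by simpa using hpa)] at hx
      rcases List.mem_cons.mp hy with h | h
      · rw [h] at hpy; exact absurd hpy hpa
      · exact ih hp2 hx h hpy

lemma bestOf_fold_spec : ∀ (l : List (Nat × List Char)) (b : Nat × List Char),
    ∃ c, l.foldl (fun best c =>
        match best with
        | none => some c
        | some b => if c.1 < b.1 then some c else some b) (some b) = some c ∧
      (c = b ∨ c ∈ l) ∧ c.1 ≤ b.1 ∧ ∀ y ∈ l, c.1 ≤ y.1 := by
  intro l
  induction l with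
  | nil => intro b; exact ⟨b, rfl, Or.inl rfl, le_refl _, by simp⟩
  | cons a l ih =>
    intro b
    simp only [List.foldl_cons]
    by_cases h : a.1 < b.1
    · rw [if_pos h]
      obtain ⟨c, hc, hmem, hle, hall⟩ := ih a
      refine ⟨c, hc, ?_, le_trans hle (le_of_lt h), ?_⟩
      · rcases hmem with h2 | h2
        · exact Or.inr (by rw [h2]; exact List.mem_cons_self)
        · exact Or.inr (List.mem_cons_of_mem _ h2)
      · intro y hy
        rcases List.mem_cons.mp hy with h2 | h2
        · rw [h2]; exact hle
        · exact hall y h2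
    · rw [if_neg h]
      obtain ⟨c, hc, hmem, hle, hall⟩ := ih b
      refine ⟨c, hc, ?_, hle, ?_⟩
      · rcases hmem with h2 | h2
        · exact Or.inl h2
        · exact Or.inr (List.mem_cons_of_mem _ h2)
      · intro y hy
        rcases List.mem_cons.mp hy with h2 | h2
        · rw [h2]; omega
        · exact hall y h2

lemma cands_subset {s : List Char} {prev : List (List Char)} {d : Buckets} (hInv : BInv prev d)
    {c : Nat × List Char} (hc : c ∈ candsB s d) : c ∈ matchesJ s prev := by
  unfold candsB at hc
  rw [List.mem_filterMap] at hc
  obtain ⟨k, hk, hmatch⟩ := hc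
  rw [List.mem_range] at hk
  cases hfind : (d.getD (k, maskAt s k) []).find? (fun jt => decide (jt.2 ≠ s)) with
  | none => rw [hfind] at hmatch; exact absurd hmatch (by simp)
  | some jt =>
    rw [hfind] at hmatch
    have hceq : c = (jt.1, maskAt s k) := (Option.some.inj hmatch).symm
    have hmem := List.mem_of_find?_eq_some hfind
    have hts : jt.2 ≠ s := by
      have h5 := List.find?_some hfind
      simpa using h5
    rw [hInv] at hmem
    obtain ⟨j, t⟩ := jt
    obtain ⟨hget, hkt, hmask⟩ := mem_bucketSpec.mp hmem
    have hlen : t.length = s.length := by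
      have h1 := length_maskAt hkt
      have h2 := length_maskAt hk
      rw [hmask] at h1
      omega
    have hfa : fA s t = some (maskAt s k) :=
      fA_eq_some_iff.mpr ⟨k, diffPos_eq_singleton_iff.mpr ⟨hlen, hk, hmask, hts⟩, rfl⟩
    rw [hceq]
    exact mem_matchesJ.mpr ⟨t, hget, hfa⟩

lemma head_min_matchesJ {s : List Char} {prev : List (List Char)} {h0 : Nat × List Char}
    (hh : (matchesJ s prev).head? = some h0) :
    ∀ y ∈ matchesJ s prev, h0.1 ≤ y.1 := by
  obtain ⟨tail, htl⟩ := List.head?_eq_some_iff.mp hh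
  have hp := pairwise_matchesJ s prev
  rw [htl] at hp ⊢
  rw [List.pairwise_cons] at hp
  intro y hy
  rcases List.mem_cons.mp hy with h | h
  · rw [h]
  · exact le_of_lt (hp.1 y h)

lemma matchesJ_key_inj {s : List Char} {prev : List (List Char)} {c h0 : Nat × List Char}
    (hc : c ∈ matchesJ s prev) (hh : h0 ∈ matchesJ s prev) (hkey : c.1 = h0.1) : c = h0 := by
  obtain ⟨j, r⟩ := c
  obtain ⟨j2, r2⟩ := h0
  simp only at hkey
  subst hkey
  obtain ⟨t, ht, hfa⟩ := mem_matchesJ.mp hc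
  obtain ⟨t2, ht2, hfa2⟩ := mem_matchesJ.mp hh
  rw [ht] at ht2
  have hteq : t = t2 := Option.some.inj ht2
  subst hteq
  rw [hfa] at hfa2
  rw [Option.some.inj hfa2]

lemma step_eq {s : List Char} {prev : List (List Char)} {d : Buckets} (hInv : BInv prev d) :
    bestOf (candsB s d) = (matchesJ s prev).head? := by
  cases hh : (matchesJ s prev).head? with
  | none =>
    have hnil : matchesJ s prev = [] := List.head?_eq_none_iff.mp hh
    have hcnil : candsB s d = [] := by
      rw [List.eq_nil_iff_forall_not_mem]
      intro c hc
      have := cands_subset hInv hc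
      rw [hnil] at this
      simp at this
    rw [hcnil]
    rfl
  | some h0 =>
    obtain ⟨j0, r0⟩ := h0
    have hh0mem : (j0, r0) ∈ matchesJ s prev := by
      obtain ⟨tail, htl⟩ := List.head?_eq_some_iff.mp hh
      rw [htl]; exact List.mem_cons_self
    obtain ⟨t0, hget0, hfa0⟩ := mem_matchesJ.mp hh0mem
    obtain ⟨k0, hdp0, hr0⟩ := fA_eq_some_iff.mp hfa0
    obtain ⟨hlen0, hk0, hmask0, hne0⟩ := diffPos_eq_singleton_iff.mp hdp0
    have hbmem : (j0, t0) ∈ d.getD (k0, maskAt s k0) [] := by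
      rw [hInv]
      exact mem_bucketSpec.mpr ⟨hget0, by omega, hmask0⟩
    have hfsome : ((d.getD (k0, maskAt s k0) []).find? (fun jt => decide (jt.2 ≠ s))).isSome := by
      rw [List.find?_isSome]
      exact ⟨(j0, t0), hbmem, by simpa using hne0⟩
    obtain ⟨jt, hfind⟩ := Option.isSome_iff_exists.mp hfsome
    obtain ⟨j1, t1⟩ := jt
    have hjtmem := List.mem_of_find?_eq_some hfind
    have hjts : t1 ≠ s := by
      have h5 := List.find?_some hfind
      simpa using h5
    have hjtle : j1 ≤ j0 := by
      refine find?_min_key ?_ hfind hbmem (by simpa using hne0)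
      rw [hInv]
      exact pairwise_bucketSpec prev k0 (maskAt s k0)
    rw [hInv] at hjtmem
    obtain ⟨hgetj, hkj, hmaskj⟩ := mem_bucketSpec.mp hjtmem
    have hlenj : t1.length = s.length := by
      have h1 := length_maskAt hkj
      have h2 := length_maskAt hk0
      rw [hmaskj] at h1
      omega
    have hfaj : fA s t1 = some (maskAt s k0) :=
      fA_eq_some_iff.mpr ⟨k0, diffPos_eq_singleton_iff.mpr ⟨hlenj, hk0, hmaskj, hjts⟩, rfl⟩
    have hjmatch : (j1, maskAt s k0) ∈ matchesJ s prev := mem_matchesJ.mpr ⟨t1, hgetj, hfaj⟩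
    have hh0le : j0 ≤ j1 := head_min_matchesJ hh _ hjmatch
    have hj0 : j1 = j0 := le_antisymm hjtle hh0le
    have hcand : (j0, r0) ∈ candsB s d := by
      unfold candsB
      rw [List.mem_filterMap]
      refine ⟨k0, List.mem_range.mpr hk0, ?_⟩
      rw [hfind]
      show some (j1, maskAt s k0) = some (j0, r0)
      rw [hj0, hr0]
    cases hcands : candsB s d with
    | nil => rw [hcands] at hcand; simp at hcand
    | cons c0 cl =>
      unfold bestOf
      rw [List.foldl_cons]
      obtain ⟨c, hc, hmem, hle, hall⟩ := bestOf_fold_spec cl c0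
      rw [show (match (none : Option (Nat × List Char)) with
        | none => some c0
        | some b => if c0.1 < b.1 then some c0 else some b) = some c0 from rfl]
      rw [hc]
      have hcmem : c ∈ candsB s d := by
        rw [hcands]
        rcases hmem with h | h
        · rw [h]; exact List.mem_cons_self
        · exact List.mem_cons_of_mem _ h
      have hcall : ∀ y ∈ candsB s d, c.1 ≤ y.1 := by
        intro y hy
        rw [hcands] at hy
        rcases List.mem_cons.mp hy with h | h
        · rw [h]; exact hle
        · exact hall y h
      have hcle : c.1 ≤ j0 := hcall _ hcand
      have hcmatch : c ∈ matchesJ s prev := cands_subset hInv hcmem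
      have hh0c : j0 ≤ c.1 := head_min_matchesJ hh _ hcmatch
      rw [matchesJ_key_inj hcmatch hh0mem (le_antisymm hcle hh0c)]

lemma stepA_eq (s : List Char) (prev : List (List Char)) :
    prev.findSome? (fA s) = ((matchesJ s prev).head?).map (fun c => c.2) := by
  have h2 : (matchesJ s prev).map (fun c => c.2) = prev.filterMap (fA s) := by
    unfold matchesJ
    rw [List.map_filterMap]
    have hfn : (fun (tj : List Char × Nat) =>
        Option.map (fun (c : Nat × List Char) => c.2) (Option.map (fun r => (tj.2, r)) (fA s tj.1))) =
        (fun tj => fA s tj.1) := by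
      funext tj
      rw [Option.map_map]
      simp
    rw [hfn]
    conv_rhs => rw [← List.zipIdx_map_fst 0 prev]
    rw [List.filterMap_map]
    rfl
  rw [← List.head?_filterMap, ← h2, List.head?_map]

lemma inv_empty : BInv [] PySem.Dict.empty := by
  intro k m
  rw [PySem.Dict.getD_empty]
  simp [bucketSpec]

lemma getD_foldl_insertMasks (s : List Char) (i : Nat) (d : Buckets) :
    ∀ (n : Nat), n ≤ s.length → ∀ (k : Nat) (m : List Char),
    (((List.range n).foldl (fun d k =>
        d.insert (k, maskAt s k) (d.getD (k, maskAt s k) [] ++ [(i, s)])) d).getD (k, m) []) =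
      if k < n ∧ maskAt s k = m then d.getD (k, m) [] ++ [(i, s)] else d.getD (k, m) [] := by
  intro n
  induction n with
  | zero => intro _ k m; simp
  | succ n ih =>
    intro hn k m
    rw [List.range_succ, List.foldl_append, List.foldl_cons, List.foldl_nil]
    rw [PySem.Dict.getD_insert]
    by_cases hkm : (k, m) = (n, maskAt s n)
    · have hk : k = n := congrArg Prod.fst hkm
      have hm : m = maskAt s n := congrArg Prod.snd hkm
      rw [if_pos hkm]
      rw [ih (by omega) n (maskAt s n)]
      rw [if_neg (by omega)]
      rw [if_pos ⟨by omega, by rw [hk, ← hm]⟩]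
      rw [hk, hm]
    · rw [if_neg hkm]
      rw [ih (by omega) k m]
      by_cases hc : k < n ∧ maskAt s k = m
      · rw [if_pos hc, if_pos ⟨by omega, hc.2⟩]
      · rw [if_neg hc, if_neg ?_]
        rintro ⟨hk1, hm1⟩
        have hkn : k ≠ n := by
          intro he
          subst he
          exact hkm (by rw [hm1])
        exact hc ⟨by omega, hm1⟩

lemma bucketSpec_append (prev : List (List Char)) (s : List Char) (k : Nat) (m : List Char) :
    bucketSpec (prev ++ [s]) k m =
      bucketSpec prev k m ++
        (if k < s.length ∧ maskAt s k = m then [(prev.length, s)] else []) := by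
  unfold bucketSpec
  rw [List.zipIdx_append, List.filterMap_append]
  congr 1
  simp only [List.zipIdx_cons, List.zipIdx_nil, List.filterMap_cons, List.filterMap_nil]
  split_ifs with hc
  · simp
  · rfl

lemma inv_step {prev : List (List Char)} {d : Buckets} (s : List Char) (h : BInv prev d) :
    BInv (prev ++ [s]) (insertMasks s prev.length d) := by
  intro k m
  unfold insertMasks
  rw [getD_foldl_insertMasks s prev.length d s.length le_rfl k m]
  rw [bucketSpec_append, ← h k m]
  split_ifs with hc
  · rfl
  · simp

lemma goB_eq_scanA : ∀ (rest prev : List (List Char)) (d : Buckets), BInv prev d →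
    goB d prev.length rest = scanA prev rest := by
  intro rest
  induction rest with
  | nil => intro prev d _; rfl
  | cons s rest ih =>
    intro prev d h
    show (match bestOf (candsB s d) with
      | some b => some b.2
      | none => goB (insertMasks s prev.length d) (prev.length + 1) rest) =
      (match prev.findSome? (fA s) with
      | some r => some r
      | none => scanA (prev ++ [s]) rest)
    rw [step_eq h, stepA_eq]
    cases hh : (matchesJ s prev).head? with
    | some b => rfl
    | none =>
      show goB (insertMasks s prev.length d) (prev.length + 1) rest = scanA (prev ++ [s]) rest
      have hstep := ih (prev ++ [s]) (insertMasks s prev.length d) (inv_step s h)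
      rwa [List.length_append, List.length_cons, List.length_nil, Nat.zero_add] at hstep

lemma findSome?_ext {α β : Type} (l : List α) (f g : α → Option β)
    (h : ∀ x ∈ l, f x = g x) : l.findSome? f = l.findSome? g := by
  induction l with
  | nil => rfl
  | cons a l ih =>
    rw [List.findSome?_cons, List.findSome?_cons, h a List.mem_cons_self]
    cases g a with
    | some r => rfl
    | none => exact ih (fun x hx => h x (List.mem_cons_of_mem _ hx))

lemma findSome?_range_getD (l : List (List Char)) :
    ∀ (g : List Char → Option (List Char)),
    (List.range l.length).findSome? (fun j => g (l.getD j [])) = l.findSome? g := by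
  induction l with
  | nil => intro g; rfl
  | cons a l ih =>
    intro g
    rw [List.length_cons, List.range_succ_eq_map, List.findSome?_cons]
    simp only [List.getD_cons_zero]
    rw [List.findSome?_map]
    have hcomp : ((fun j => g ((a :: l).getD j [])) ∘ Nat.succ) = (fun j => g (l.getD j [])) := by
      funext j
      simp
    rw [hcomp, ih g, List.findSome?_cons]

lemma scanA_eq_range : ∀ (rest prev : List (List Char)),
    scanA prev rest = (List.range rest.length).findSome? (fun i =>
      (prev ++ rest.take i).findSome? (fA (rest.getD i []))) := by
  intro rest
  induction rest with
  | nil => intro prev; rfl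
  | cons s rest ih =>
    intro prev
    rw [List.length_cons, List.range_succ_eq_map, List.findSome?_cons]
    simp only [List.take_zero, List.append_nil, List.getD_cons_zero]
    show (match prev.findSome? (fA s) with
      | some r => some r
      | none => scanA (prev ++ [s]) rest) = _
    cases hh : prev.findSome? (fA s) with
    | some r => rfl
    | none =>
      rw [List.findSome?_map]
      have hcomp : ((fun i => (prev ++ (s :: rest).take i).findSome? (fA ((s :: rest).getD i []))) ∘ Nat.succ) =
          (fun i => ((prev ++ [s]) ++ rest.take i).findSome? (fA (rest.getD i []))) := by
        funext i
        simp [List.take_succ_cons, List.append_assoc]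
      rw [hcomp, ← ih (prev ++ [s])]

lemma core_eq (inp : List (List Char)) :
    (List.range inp.length).findSome? (fun i =>
      (List.range i).findSome? (fun j => fA (inp.getD i []) (inp.getD j []))) =
    goB PySem.Dict.empty 0 inp := by
  have h1 : (List.range inp.length).findSome? (fun i =>
      (List.range i).findSome? (fun j => fA (inp.getD i []) (inp.getD j []))) =
      (List.range inp.length).findSome? (fun i =>
        (inp.take i).findSome? (fA (inp.getD i []))) := by
    apply findSome?_ext
    intro i hi
    rw [List.mem_range] at hi
    have h2 : (List.range i).findSome? (fun j => fA (inp.getD i []) (inp.getD j [])) =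
        (List.range i).findSome? (fun j => fA (inp.getD i []) ((inp.take i).getD j [])) := by
      apply findSome?_ext
      intro j hj
      rw [List.mem_range] at hj
      congr 1
      rw [List.getD_eq_getElem?_getD, List.getD_eq_getElem?_getD, List.getElem?_take,
        if_pos hj]
    rw [h2]
    rw [show List.range i = List.range (inp.take i).length by
      congr 1
      rw [List.length_take]
      omega]
    exact findSome?_range_getD (inp.take i) (fA (inp.getD i []))
  rw [h1]
  have h3 : scanA [] inp = (List.range inp.length).findSome? (fun i =>
      (inp.take i).findSome? (fA (inp.getD i []))) := by
    rw [scanA_eq_range inp []]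
    apply findSome?_ext
    intro i _
    rw [List.nil_append]
  rw [← h3]
  have h4 := goB_eq_scanA inp [] PySem.Dict.empty inv_empty
  simpa using h4.symm

-- ===== VERDICT (by name: the statement is the Claim_ definition above) =====
theorem solve_spec : Claim_equal_solve := by
  intro input_iter _
  unfold Spec_solve
  show solve input_iter = solve_alt input_iter
  simp only [solve, solve_alt]
  rw [← core_eq (input_iter.map (fun line => (PySem.Str.strip line).toList))]
  rfl
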